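-- pv_equiv track=rewrite | github.com/avilamowski/hyper_jade | ejemplos/ej1-2025-s1-r2/alumn_37.py | strip
-- ===== SOURCE A (Python) =====
-- def strip(s):
--     i = 0
--     while i < len(s) and (s[i] == " " or s[i] == "\n"):
--         i += 1
--     s = s[i:][::-1]
--
--     j = 0
--     while j < len(s) and (s[j] == " " or s[j] == "\n"):
--         j += 1
--     s = s[j:][::-1]
--
--     return s
-- ===== SOURCE B (Python) =====
-- def strip(s):
--     start = 0
--     while start < len(s) and s[start] in " \n":
--         start += 1
--     stop = len(s)
--     while stop > start and s[stop - 1] in " \n":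
--         stop -= 1
--     return s[start:stop]
-- ===== Notes on version B (the rewrite author's own statement) =====
-- stated objective: simpler
-- what changed: Replaces A's drop-reverse-drop-reverse trick (two string reversals and two slices) with a two-index scan from both ends and a single slice.
import Mathlib
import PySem

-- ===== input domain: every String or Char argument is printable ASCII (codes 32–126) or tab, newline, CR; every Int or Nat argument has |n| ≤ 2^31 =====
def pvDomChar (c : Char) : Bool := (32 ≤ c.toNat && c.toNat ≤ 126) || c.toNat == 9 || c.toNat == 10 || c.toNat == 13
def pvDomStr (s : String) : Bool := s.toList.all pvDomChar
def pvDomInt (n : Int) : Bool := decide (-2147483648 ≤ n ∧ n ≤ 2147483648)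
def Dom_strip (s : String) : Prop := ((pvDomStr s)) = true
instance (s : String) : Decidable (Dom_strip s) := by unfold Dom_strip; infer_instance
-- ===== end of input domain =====

-- B replaces A's drop-reverse-drop-reverse trick with a two-index scan from both ends and one slice (objective: simpler).


-- ===== PORT A =====
-- A's 'while i < len(s) and (s[i] == " " or s[i] == "\n"): i += 1' (nested ifs = Python's short-circuit 'and')
def stripScanA (l : List Char) (i : Nat) : Nat :=
  if h : i < l.length then
    if l[i] == ' ' || l[i] == '\n' then stripScanA l (i + 1) else i
  else i
termination_by l.length - i

-- A: advance i over leading blanks, s = s[i:][::-1]; repeat with j; return.  s[i:] with i ≥ 0 is List.drop, [::-1] is reverse (exact).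
def strip (s : String) : String :=
  let l0 := s.toList
  let i := stripScanA l0 0
  let l1 := (l0.drop i).reverse
  let j := stripScanA l1 0
  let l2 := (l1.drop j).reverse
  String.ofList l2

-- ===== PORT B =====
-- B's 'while start < len(s) and s[start] in " \n": start += 1'
def stripFwdB (l : List Char) (start : Nat) : Nat :=
  if h : start < l.length then
    if l[start] == ' ' || l[start] == '\n' then stripFwdB l (start + 1) else start
  else start
termination_by l.length - start

-- B's 'while stop > start and s[stop-1] in " \n": stop -= 1'  (the 'stop ≤ l.length' conjunct is only a
-- totality guard for the indexing; at the call site stop starts at len(s) and only decreases, so it holds)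
def stripBwdB (l : List Char) (start stop : Nat) : Nat :=
  if h : start < stop ∧ stop ≤ l.length then
    if l[stop - 1]'(by omega) == ' ' || l[stop - 1]'(by omega) == '\n' then
      stripBwdB l start (stop - 1)
    else stop
  else stop
termination_by stop

-- B: two-pointer scan, one slice s[start:stop] (0 ≤ start ≤ stop: drop/take, exact by PySem.List.slice_natCast)
def strip_alt (s : String) : String :=
  let l := s.toList
  let start := stripFwdB l 0
  let stop := stripBwdB l start l.length
  String.ofList ((l.drop start).take (stop - start))

-- ===== PRECONDITION & SPEC =====
def Spec_strip (s : String) (out : String) : Prop := out = strip_alt s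
instance (s : String) (out : String) : Decidable (Spec_strip s out) := by unfold Spec_strip; infer_instance

-- ===== CLAIM (what is proved, stated in full; the proofs are below) =====
def Claim_equal_strip : Prop := ∀ (s : String), Dom_strip s → Spec_strip s (strip s)

-- ===== LEMMAS AND PROOFS =====
def pvWs (c : Char) : Bool := c == ' ' || c == '\n'

theorem stripScanA_eq (l : List Char) (i : Nat) :
    stripScanA l i = i + ((l.drop i).takeWhile pvWs).length := by
  fun_induction stripScanA l i with
  | case1 i h hw ih =>
    rw [ih, List.drop_eq_getElem_cons h, List.takeWhile_cons_of_pos (by simpa [pvWs] using hw)]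
    simp; omega
  | case2 i h hw =>
    rw [List.drop_eq_getElem_cons h, List.takeWhile_cons_of_neg (by simpa [pvWs] using hw)]
    simp
  | case3 i h =>
    rw [List.drop_eq_nil_of_le (by omega)]
    simp

theorem stripFwdB_eq (l : List Char) (i : Nat) :
    stripFwdB l i = i + ((l.drop i).takeWhile pvWs).length := by
  fun_induction stripFwdB l i with
  | case1 i h hw ih =>
    rw [ih, List.drop_eq_getElem_cons h, List.takeWhile_cons_of_pos (by simpa [pvWs] using hw)]
    simp; omega
  | case2 i h hw =>
    rw [List.drop_eq_getElem_cons h, List.takeWhile_cons_of_neg (by simpa [pvWs] using hw)]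
    simp
  | case3 i h =>
    rw [List.drop_eq_nil_of_le (by omega)]
    simp

theorem takeWhile_length_le {α : Type} (p : α → Bool) (l : List α) :
    (l.takeWhile p).length ≤ l.length :=
  (List.takeWhile_sublist p).length_le

theorem rev_seg_cons (l : List Char) (start stop : Nat)
    (h1 : start < stop) (h2 : stop ≤ l.length) :
    ((l.take stop).drop start).reverse
      = (l[stop - 1]'(by omega)) :: ((l.take (stop - 1)).drop start).reverse := by
  have htk : l.take stop = l.take (stop - 1) ++ [l[stop - 1]'(by omega)] := by
    conv_lhs => rw [show stop = (stop - 1) + 1 by omega]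
    rw [List.take_add_one]
    simp [List.getElem?_eq_getElem (show stop - 1 < l.length by omega)]
  rw [htk, List.drop_append_of_le_length (by simp; omega)]
  simp

theorem stripBwdB_eq (l : List Char) (start stop : Nat)
    (h1 : start ≤ stop) (h2 : stop ≤ l.length) :
    stripBwdB l start stop = stop - (((l.take stop).drop start).reverse.takeWhile pvWs).length := by
  fun_induction stripBwdB l start stop with
  | case1 stop h hw ih =>
    rw [ih (by omega) (by omega),
      rev_seg_cons l start stop (by omega) (by omega),
      List.takeWhile_cons_of_pos (by simpa [pvWs] using hw)]
    have hb := takeWhile_length_le pvWs ((l.take (stop - 1)).drop start).reverse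
    simp at hb ⊢
    omega
  | case2 stop h hw =>
    rw [rev_seg_cons l start stop (by omega) (by omega),
      List.takeWhile_cons_of_neg (by simpa [pvWs] using hw)]
    simp
  | case3 stop h =>
    have hss : start = stop := by omega
    subst hss
    simp

theorem rev_drop_rev (m : List Char) (k : Nat) :
    (m.reverse.drop k).reverse = m.take (m.length - k) := by
  rw [List.reverse_drop]
  simp

-- ===== VERDICT (by name: the statement is the Claim_ definition above) =====
theorem strip_spec : Claim_equal_strip := by
  intro s _
  unfold Spec_strip strip strip_alt
  simp only [stripScanA_eq, stripFwdB_eq, List.drop_zero, Nat.zero_add]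
  set l := s.toList with hl
  set a := (l.takeWhile pvWs).length with hakey
  have hal : a ≤ l.length := takeWhile_length_le pvWs l
  set m := l.drop a with hm
  rw [stripBwdB_eq l a l.length hal (le_refl _), List.take_length]
  set k := (m.reverse.takeWhile pvWs).length with hk
  have hkm : k ≤ m.length := by
    simpa using takeWhile_length_le pvWs m.reverse
  have hml : m.length = l.length - a := by simp [hm]
  rw [rev_drop_rev]
  congr 1
  have hlen : m.length - k = l.length - k - a := by omega
  rw [hlen]
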